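-- pv_equiv track=rewrite | github.com/XSorensen/AoC-2024 | Day 2/challenge.py | dupe_array_without_index
-- ===== SOURCE A (Python) =====
-- def dupe_array_without_index(arr, index):
--     arr_len = len(arr)
--
--     if(index < 0 or index >= arr_len):
--         raise IndexError(f"Index {index} out of range of array of length {arr_len}")
--
--     ret_arr = [None] * (arr_len - 1)
--
--     assert(len(ret_arr) == len(arr) - 1)
--
--     for i in range(0, index):
--         ret_arr[i] = arr[i]
--
--     for i in range(index + 1, arr_len):
--         ret_arr[i - 1] = arr[i]
--
--     return ret_arr
-- ===== SOURCE B (Python) =====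
-- def dupe_array_without_index(arr, index):
--     arr_len = len(arr)
--     if index < 0 or index >= arr_len:
--         raise IndexError(f"Index {index} out of range of array of length {arr_len}")
--     return list(arr[:index]) + list(arr[index + 1:])
-- ===== Notes on version B (the rewrite author's own statement) =====
-- stated objective: simpler
-- what changed: Replaces the preallocated [None]*(n-1) buffer filled by two index-arithmetic loops with a single slice concatenation arr[:index] + arr[index+1:].
import Mathlib
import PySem

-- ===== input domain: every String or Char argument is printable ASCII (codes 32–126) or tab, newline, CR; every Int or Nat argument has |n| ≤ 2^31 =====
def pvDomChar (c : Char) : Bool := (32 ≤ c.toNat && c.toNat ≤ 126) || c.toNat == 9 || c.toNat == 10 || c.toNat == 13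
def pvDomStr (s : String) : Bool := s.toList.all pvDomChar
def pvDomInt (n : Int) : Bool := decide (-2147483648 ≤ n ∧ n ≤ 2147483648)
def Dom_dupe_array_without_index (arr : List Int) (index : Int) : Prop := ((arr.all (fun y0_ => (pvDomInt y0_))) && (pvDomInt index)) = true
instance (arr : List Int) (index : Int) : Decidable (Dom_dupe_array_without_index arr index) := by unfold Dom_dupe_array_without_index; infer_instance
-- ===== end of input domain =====

-- B changes A's preallocated buffer filled by two index loops into a slice concatenation (simpler decomposition).

-- ===== PORT A =====
-- [None] * (arr_len - 1) is modelled as a list of 0 placeholders: under Pre_ every slot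
-- is overwritten by the two loops below, so the placeholder value is never observable.
def dupe_array_without_index (arr : List Int) (index : Int) : List Int :=
  let arr_len : Int := arr.length
  -- if index < 0 or index >= arr_len: raise IndexError  (excluded by Pre_)
  let ret_arr : List Int := List.replicate (arr_len - 1).toNat 0
  let ret_arr := (PySem.List.pyRange 0 index 1).foldl
    (fun r i => PySem.List.pySetD r i (PySem.List.pyGetD arr i 0)) ret_arr
  let ret_arr := (PySem.List.pyRange (index + 1) arr_len 1).foldl
    (fun r i => PySem.List.pySetD r (i - 1) (PySem.List.pyGetD arr i 0)) ret_arr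
  ret_arr

-- ===== PORT B =====
def dupe_array_without_index_alt (arr : List Int) (index : Int) : List Int :=
  -- arr_len = len(arr); if index < 0 or index >= arr_len: raise IndexError  (excluded by Pre_)
  PySem.List.slice arr none (some index) ++ PySem.List.slice arr (some (index + 1)) none

-- ===== PRECONDITION & SPEC =====
-- Pre_ excludes exactly the inputs on which A raises IndexError (index out of range).
def Pre_dupe_array_without_index (arr : List Int) (index : Int) : Prop :=
  0 ≤ index ∧ index < arr.length
instance (arr : List Int) (index : Int) : Decidable (Pre_dupe_array_without_index arr index) := by
  unfold Pre_dupe_array_without_index; infer_instance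

def pvWitness_dupe_array_without_index : List Int × Int := ([3, 1, 4, 1, 5], 2)

def Spec_dupe_array_without_index (arr : List Int) (index : Int) (out : List Int) : Prop := out = dupe_array_without_index_alt arr index
instance (arr : List Int) (index : Int) (out : List Int) : Decidable (Spec_dupe_array_without_index arr index out) := by unfold Spec_dupe_array_without_index; infer_instance

-- ===== CLAIM (what is proved, stated in full; the proofs are below) =====
def Claim_equal_dupe_array_without_index : Prop := ∀ (arr : List Int) (index : Int), Dom_dupe_array_without_index arr index → Pre_dupe_array_without_index arr index → Spec_dupe_array_without_index arr index (dupe_array_without_index arr index)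

-- ===== LEMMAS AND PROOFS =====

-- Loop 1: after `for i in range(0, k): ret[i] = arr[i]`, the buffer r becomes arr.take k ++ r.drop k.
theorem pv_loop1_eq (arr : List Int) (k : Nat) (r : List Int)
    (hk : k ≤ arr.length) (hr : k ≤ r.length) :
    (PySem.List.pyRange 0 (k : Int) 1).foldl
      (fun r i => PySem.List.pySetD r i (PySem.List.pyGetD arr i 0)) r
    = arr.take k ++ r.drop k := by
  induction k with
  | zero => simp [PySem.List.pyRange]
  | succ k ih =>
    have hk' : k < arr.length := by omega
    have hr' : k < r.length := by omega
    have hrng : PySem.List.pyRange 0 ((k : Int) + 1) 1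
        = PySem.List.pyRange 0 (k : Int) 1 ++ [(k : Int)] :=
      PySem.List.pyRange_one_succ_right (by omega)
    push_cast
    rw [hrng, List.foldl_append, ih (by omega) (by omega)]
    simp only [List.foldl_cons, List.foldl_nil, PySem.List.pySetD_natCast,
      PySem.List.pyGetD_natCast]
    rw [List.set_append_right _ _ (by simp only [List.length_take]; omega)]
    simp only [List.length_take]
    have hd : r.drop k = r[k] :: r.drop (k + 1) := List.drop_eq_getElem_cons hr'
    rw [hd, Nat.min_eq_left (by omega), Nat.sub_self, List.set_cons_zero,
      List.getD_eq_getElem _ _ hk']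
    have ht : arr.take (k + 1) = arr.take k ++ [arr[k]] := by
      rw [List.take_add_one, List.getElem?_eq_getElem hk']; rfl
    rw [ht, List.append_assoc]; rfl

theorem pv_loop2_eq (arr : List Int) (k j : Nat) (s : List Int)
    (hj : k + 1 + j ≤ arr.length) (hs : k + j ≤ s.length) :
    (PySem.List.pyRange ((k : Int) + 1) ((k : Int) + 1 + (j : Int)) 1).foldl
      (fun r i => PySem.List.pySetD r (i - 1) (PySem.List.pyGetD arr i 0)) s
    = s.take k ++ (arr.drop (k + 1)).take j ++ s.drop (k + j) := by
  induction j with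
  | zero => simp [PySem.List.pyRange]
  | succ j ih =>
    have hrng : PySem.List.pyRange ((k : Int) + 1) ((k : Int) + 1 + (j : Int) + 1) 1
        = PySem.List.pyRange ((k : Int) + 1) ((k : Int) + 1 + (j : Int)) 1
          ++ [(k : Int) + 1 + (j : Int)] :=
      PySem.List.pyRange_one_succ_right (by omega)
    push_cast
    rw [show (k : Int) + 1 + ((j : Int) + 1) = (k : Int) + 1 + (j : Int) + 1 by ring,
      hrng, List.foldl_append, ih (by omega) (by omega)]
    simp only [List.foldl_cons, List.foldl_nil]
    have hkj : k + j < s.length := by omega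
    have hka : k + 1 + j < arr.length := by omega
    have hidx : (k : Int) + 1 + (j : Int) - 1 = ((k + j : Nat) : Int) := by push_cast; ring
    have hget : (k : Int) + 1 + (j : Int) = ((k + 1 + j : Nat) : Int) := by push_cast; ring
    rw [hidx, hget, PySem.List.pySetD_natCast, PySem.List.pyGetD_natCast]
    have hlen : (s.take k ++ (arr.drop (k + 1)).take j).length = k + j := by
      simp only [List.length_append, List.length_take, List.length_drop]; omega
    rw [List.append_assoc, List.set_append_right _ _ (by simp only [List.length_take]; omega)]
    have hlt : (List.take k s).length = k := by simp only [List.length_take]; omega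
    have hjl : (List.take j (List.drop (k + 1) arr)).length = j := by
      simp only [List.length_take, List.length_drop]; omega
    rw [hlt, Nat.add_sub_cancel_left,
      List.set_append_right _ _ (by omega), hjl, Nat.sub_self]
    have hd : s.drop (k + j) = s[k + j] :: s.drop (k + j + 1) := List.drop_eq_getElem_cons hkj
    rw [hd, List.set_cons_zero, List.getD_eq_getElem _ _ hka]
    have hXj : (List.drop (k + 1) arr)[j]'(by simp only [List.length_drop]; omega)
        = arr[k + 1 + j] := by
      rw [List.getElem_drop]
    have ht : (List.drop (k + 1) arr).take (j + 1)
        = (List.drop (k + 1) arr).take j ++ [arr[k + 1 + j]] := by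
      rw [List.take_add_one, List.getElem?_eq_getElem (by simp only [List.length_drop]; omega),
        hXj]; rfl
    rw [ht, show k + (j + 1) = k + j + 1 by ring]
    simp [List.append_assoc]

-- ===== VERDICT (by name: the statement is the Claim_ definition above) =====
theorem dupe_array_without_index_spec : Claim_equal_dupe_array_without_index := by
  intro arr index _ hpre
  obtain ⟨h0, hlt⟩ := hpre
  have hik : index = (index.toNat : Int) := (Int.toNat_of_nonneg h0).symm
  generalize hkk : index.toNat = k at hik
  have hk : k < arr.length := by omega
  unfold Spec_dupe_array_without_index dupe_array_without_index dupe_array_without_index_alt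
  simp only []
  rw [hik, PySem.List.slice_to arr (by omega), PySem.List.slice_from arr (by omega)]
  rw [show ((k : Int)).toNat = k by omega, show ((k : Int) + 1).toNat = k + 1 by omega]
  rw [show ((arr.length : Int) - 1).toNat = arr.length - 1 by omega]
  rw [pv_loop1_eq arr k _ (by omega) (by simp only [List.length_replicate]; omega)]
  rw [show (arr.length : Int) = (k : Int) + 1 + ((arr.length - (k + 1) : Nat) : Int) by omega]
  rw [pv_loop2_eq arr k (arr.length - (k + 1)) _ (by omega)
    (by simp only [List.length_append, List.length_take, List.length_drop, List.length_replicate]; omega)]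
  have hslen : (arr.take k ++ (List.replicate (arr.length - 1) (0 : Int)).drop k).length
      = arr.length - 1 := by
    simp only [List.length_append, List.length_take, List.length_drop, List.length_replicate]; omega
  have hd : (arr.take k ++ (List.replicate (arr.length - 1) (0 : Int)).drop k).drop
      (k + (arr.length - (k + 1))) = [] := List.drop_eq_nil_of_le (by rw [hslen]; omega)
  have ht : (arr.take k ++ (List.replicate (arr.length - 1) (0 : Int)).drop k).take k
      = arr.take k := by
    rw [List.take_append_of_le_length (by simp only [List.length_take]; omega),
      List.take_take, Nat.min_self]
  have htk : (arr.drop (k + 1)).take (arr.length - (k + 1)) = arr.drop (k + 1) :=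
    List.take_of_length_le (by simp only [List.length_drop]; omega)
  rw [hd, ht, htk, List.append_nil]
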